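-- pv_equiv track=rewrite | github.com/hjanssena/ChomskyNormalForm | FormaNormal/chomskyLib.py | parseTerminales
-- ===== SOURCE A (Python) =====
-- def parseTerminales(producciones):
--     terminales = []
--     for produccion in producciones:
--         term = ""
--         inside = False
--         for c in produccion[1]:
--             if c == "'" and inside == False:
--                 inside = True
--             elif c == "'" and inside == True:
--                 inside = False
--                 if "'" + term + "'" not in terminales:
--                     terminales.append("'" + term + "'")
--                 term = ""
--             elif inside == True:
--                 term += c
--     return terminales
-- ===== SOURCE B (Python) =====
-- def parseTerminales(producciones):
--     terminales = []
--     for produccion in producciones: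
--         parts = produccion[1].split("'")
--         for i, t in enumerate(parts):
--             if i % 2 == 1 and i != len(parts) - 1:
--                 q = "'" + t + "'"
--                 if q not in terminales:
--                     terminales.append(q)
--     return terminales
-- ===== Notes on version B (the rewrite author's own statement) =====
-- stated objective: idiomatic
-- what changed: Replaces the per-character quote-toggling state machine (inside flag plus a growing term buffer) by splitting each rule body on the quote character once and collecting the odd-indexed, non-final pieces via enumerate.
import Mathlib
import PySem

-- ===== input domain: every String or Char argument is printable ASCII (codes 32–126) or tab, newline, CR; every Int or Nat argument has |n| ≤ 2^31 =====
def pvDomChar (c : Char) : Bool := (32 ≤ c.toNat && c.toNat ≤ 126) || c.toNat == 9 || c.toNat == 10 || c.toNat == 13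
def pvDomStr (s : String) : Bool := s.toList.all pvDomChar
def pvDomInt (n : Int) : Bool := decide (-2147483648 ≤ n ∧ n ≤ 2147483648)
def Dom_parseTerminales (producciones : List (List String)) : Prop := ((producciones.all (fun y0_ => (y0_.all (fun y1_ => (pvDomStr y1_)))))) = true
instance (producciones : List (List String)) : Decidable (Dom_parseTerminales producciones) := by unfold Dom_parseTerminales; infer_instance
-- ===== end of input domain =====

-- B replaces A's per-character quote-toggling state machine by splitting each rule body on
-- the quote character and collecting the odd-indexed, non-final pieces (objective: idiomatic).

-- ===== PORT A =====
-- inner character loop of A: state (term, inside, terminales)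
def fsmA : List Char → String → Bool → List String → List String
  | [], _, _, acc => acc
  | c :: cs, term, inside, acc =>
    if c = '\'' ∧ inside = false then fsmA cs term true acc
    else if c = '\'' ∧ inside = true then
      let q := "'" ++ term ++ "'"
      fsmA cs "" false (if q ∈ acc then acc else acc ++ [q])
    else if inside = true then fsmA cs (term.push c) inside acc
    else fsmA cs term inside acc

def parseTerminales (producciones : List (List String)) : List String :=
  producciones.foldl (fun terminales produccion =>
    match PySem.List.pyGet? produccion 1 with
    | none => terminales      -- produccion[1]: IndexError, excluded by Pre_
    | some s => fsmA s.toList "" false terminales) []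

-- ===== PORT B =====
def parseTerminales_alt (producciones : List (List String)) : List String :=
  producciones.foldl (fun terminales produccion =>
    match PySem.List.pyGet? produccion 1 with
    | none => terminales      -- produccion[1]: IndexError, excluded by Pre_
    | some s =>
      let parts := (PySem.Str.split? s "'").getD []   -- sep "'" ≠ "", so split? is always some
      (PySem.List.enumerate parts).foldl (fun acc it =>
        if PySem.Int.mod it.1 2 == 1 && it.1 != (parts.length : Int) - 1 then
          let q := "'" ++ it.2 ++ "'"
          if q ∈ acc then acc else acc ++ [q]
        else acc) terminales) []

-- ===== PRECONDITION & SPEC =====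
-- Pre_ excludes only inputs where A raises IndexError (a production with fewer than 2 fields).
def Pre_parseTerminales (producciones : List (List String)) : Prop :=
  ∀ p ∈ producciones, 2 ≤ p.length
instance (producciones : List (List String)) : Decidable (Pre_parseTerminales producciones) := by
  unfold Pre_parseTerminales; infer_instance

def pvWitness_parseTerminales : List (List String) := [["S", "'a' B 'b' 'a'"], ["B", "'b'"]]

def Spec_parseTerminales (producciones : List (List String)) (out : List String) : Prop := out = parseTerminales_alt producciones
instance (producciones : List (List String)) (out : List String) : Decidable (Spec_parseTerminales producciones out) := by unfold Spec_parseTerminales; infer_instance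

-- ===== CLAIM (what is proved, stated in full; the proofs are below) =====
def Claim_equal_parseTerminales : Prop := ∀ (producciones : List (List String)), Dom_parseTerminales producciones → Pre_parseTerminales producciones → Spec_parseTerminales producciones (parseTerminales producciones)

-- ===== LEMMAS AND PROOFS =====

-- Python's s.split("'") as a structural recursion over the character list
def pysplit : List Char → List (List Char)
  | [] => [[]]
  | c :: rest =>
    if c = '\'' then [] :: pysplit rest
    else
      match pysplit rest with
      | [] => [[c]]
      | p :: ps => (c :: p) :: ps

lemma pysplit_ne_nil (cs : List Char) : pysplit cs ≠ [] := by
  cases cs with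
  | nil => simp [pysplit]
  | cons c rest =>
    simp only [pysplit]
    split
    · simp
    · split <;> simp

def prependCur (pre : List Char) : List (List Char) → List (List Char)
  | [] => []
  | p :: ps => (pre ++ p) :: ps

lemma go_spec : ∀ (fuel : ℕ) (l cur : List Char) (acc : List (List Char)), l.length < fuel →
    PySem.Chars.splitOn.go ['\''] fuel l cur acc = acc.reverse ++ prependCur cur.reverse (pysplit l) := by
  intro fuel
  induction fuel with
  | zero => intro l cur acc h; omega
  | succ n ih =>
    intro l cur acc h
    cases l with
    | nil =>
      simp [PySem.Chars.splitOn.go, pysplit, prependCur]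
    | cons c rest =>
      by_cases hc : c = '\''
      · subst hc
        rw [show PySem.Chars.splitOn.go ['\''] (n+1) ('\'' :: rest) cur acc
              = PySem.Chars.splitOn.go ['\''] n (List.drop 1 ('\'' :: rest)) [] (cur.reverse :: acc) by
            simp [PySem.Chars.splitOn.go, List.isPrefixOf]]
        rw [List.drop_one, List.tail_cons, ih rest [] (cur.reverse :: acc) (by simp at h ⊢; omega)]
        rcases hps : pysplit rest with _ | ⟨p, ps⟩
        · exact absurd hps (pysplit_ne_nil rest)
        · simp [pysplit, hps, prependCur]
      · rw [show PySem.Chars.splitOn.go ['\''] (n+1) (c :: rest) cur acc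
              = PySem.Chars.splitOn.go ['\''] n rest (c :: cur) acc by
            simp [PySem.Chars.splitOn.go, List.isPrefixOf, Ne.symm hc]]
        rw [ih rest (c :: cur) acc (by simp at h ⊢; omega)]
        rcases hps : pysplit rest with _ | ⟨p, ps⟩
        · exact absurd hps (pysplit_ne_nil rest)
        · simp [pysplit, hps, prependCur, hc]

lemma splitOn_eq_pysplit (cs : List Char) : PySem.Chars.splitOn cs ['\''] = pysplit cs := by
  rw [PySem.Chars.splitOn, go_spec (cs.length + 1) cs [] [] (by omega)]
  rcases hps : pysplit cs with _ | ⟨p, ps⟩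
  · exact absurd hps (pysplit_ne_nil cs)
  · simp [prependCur]

lemma split?_eq (s : String) :
    PySem.Str.split? s "'" = some ((pysplit s.toList).map String.ofList) := by
  have : ("'" : String).toList = ['\''] := rfl
  simp [PySem.Str.split?, PySem.Chars.split?, this, splitOn_eq_pysplit]

-- the add-if-absent step shared by both ports' semantics
def addU (acc : List String) (q : String) : List String :=
  if q ∈ acc then acc else acc ++ [q]

-- processing the parts list from an INSIDE part: emit head (if closed), skip next (outside), recurse
def inS : List String → String → List String → List String
  | [], _, acc => acc
  | [_], _, acc => acc
  | i :: _ :: ps, term, acc => inS ps "" (addU acc ("'" ++ (term ++ i) ++ "'"))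

lemma fsm_spec : ∀ (cs : List Char) (term : String) (acc : List String),
    fsmA cs term false acc = inS (((pysplit cs).map String.ofList).tail) term acc
    ∧ fsmA cs term true acc = inS ((pysplit cs).map String.ofList) term acc := by
  intro cs
  induction cs with
  | nil => intro term acc; simp [fsmA, pysplit, inS]
  | cons c rest ih =>
    intro term acc
    by_cases hc : c = '\''
    · subst hc
      constructor
      · rw [show fsmA ('\'' :: rest) term false acc = fsmA rest term true acc by simp [fsmA]]
        rw [(ih term acc).2]
        simp [pysplit]
      · rw [show fsmA ('\'' :: rest) term true acc
              = fsmA rest "" false (addU acc ("'" ++ term ++ "'")) by simp [fsmA, addU]]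
        rw [(ih "" _).1]
        rcases hps : pysplit rest with _ | ⟨p, ps⟩
        · exact absurd hps (pysplit_ne_nil rest)
        · simp [pysplit, hps, inS]
    · rcases hps : pysplit rest with _ | ⟨p, ps⟩
      · exact absurd hps (pysplit_ne_nil rest)
      constructor
      · rw [show fsmA (c :: rest) term false acc = fsmA rest term false acc by
            simp [fsmA, hc]]
        rw [(ih term acc).1]
        simp [pysplit, hps, hc]
      · rw [show fsmA (c :: rest) term true acc = fsmA rest (term.push c) true acc by
            simp [fsmA, hc]]
        rw [(ih (term.push c) acc).2]
        simp only [pysplit, hps, if_neg hc, List.map_cons]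
        rcases ps with _ | ⟨q, ps2⟩
        · simp [inS]
        · simp only [List.map_cons, inS]
          have hstr : term.push c ++ String.ofList p = term ++ String.ofList (c :: p) := by
            rw [← String.toList_inj]
            simp
          rw [hstr]

lemma mod_two_beq (k : ℕ) : (PySem.Int.mod (k : Int) 2 == 1) = decide (k % 2 = 1) := by
  unfold PySem.Int.mod
  rw [Int.fmod_eq_emod, if_pos (Or.inl (by norm_num : (0 : ℤ) ≤ 2)), add_zero]
  by_cases h : k % 2 = 1 <;> simp [h] <;> omega

lemma enum_fold_spec (L : ℕ) : ∀ (ps : List String) (k : ℕ) (acc : List String), k + ps.length = L →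
    ((PySem.List.enumerate ps (k : Int)).foldl (fun acc it =>
        if PySem.Int.mod it.1 2 == 1 && it.1 != (L : Int) - 1 then
          let q := "'" ++ it.2 ++ "'"
          if q ∈ acc then acc else acc ++ [q]
        else acc) acc)
    = if k % 2 = 1 then inS ps "" acc else inS ps.tail "" acc := by
  intro ps
  induction ps with
  | nil =>
    intro k acc h
    rw [show PySem.List.enumerate ([] : List String) (k : Int) = [] from rfl, List.foldl_nil]
    split <;> rfl
  | cons t rest ih =>
    intro k acc h
    set f := (fun (acc : List String) (it : ℤ × String) =>
        if PySem.Int.mod it.1 2 == 1 && it.1 != (L : Int) - 1 then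
          let q := "'" ++ it.2 ++ "'"
          if q ∈ acc then acc else acc ++ [q]
        else acc) with hf
    rw [show PySem.List.enumerate (t :: rest) (k : Int) = ((k : Int), t) :: PySem.List.enumerate rest ((k : Int) + 1) by
        simp [PySem.List.enumerate], List.foldl_cons]
    have hcast : ((k : Int) + 1) = (((k + 1 : ℕ)) : Int) := by push_cast; ring
    have hempty : ("" : String) ++ t = t := by rw [← String.toList_inj]; simp
    by_cases hk : k % 2 = 1
    · have hc1 : (PySem.Int.mod (k : Int) 2 == 1) = true := by rw [mod_two_beq]; simp [hk]
      rcases rest with _ | ⟨p2, rest2⟩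
      · have hL : k + 1 = L := by simpa using h
        have hc2 : ((k : Int) != (L : Int) - 1) = false := by simp; omega
        have hcond : (PySem.Int.mod (k : Int) 2 == 1 && ((k : Int) != (L : Int) - 1)) = false := by
          rw [hc1, hc2]; rfl
        have hstep : f acc ((k : Int), t) = acc := by simp only [hf]; rw [hcond]; simp
        rw [hstep]
        rw [show PySem.List.enumerate ([] : List String) ((k : Int) + 1) = [] from rfl, List.foldl_nil]
        rw [if_pos hk]; rfl
      · have hL : k + 2 + rest2.length = L := by simp at h; omega
        have hc2 : ((k : Int) != (L : Int) - 1) = true := by simp; omega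
        have hcond : (PySem.Int.mod (k : Int) 2 == 1 && ((k : Int) != (L : Int) - 1)) = true := by
          rw [hc1, hc2]; rfl
        have hstep : f acc ((k : Int), t) = addU acc ("'" ++ t ++ "'") := by
          simp only [hf]; rw [hcond]; simp [addU]
        rw [hstep, hcast, ih (k + 1) (addU acc ("'" ++ t ++ "'")) (by simp at h ⊢; omega)]
        rw [if_neg (by omega : ¬ (k + 1) % 2 = 1), if_pos hk]
        simp only [inS, List.tail_cons, hempty]
    · have hc1 : (PySem.Int.mod (k : Int) 2 == 1) = false := by rw [mod_two_beq]; simp [hk]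
      have hcond : (PySem.Int.mod (k : Int) 2 == 1 && ((k : Int) != (L : Int) - 1)) = false := by
        rw [hc1]; rfl
      have hstep : f acc ((k : Int), t) = acc := by simp only [hf]; rw [hcond]; simp
      rw [hstep, hcast, ih (k + 1) acc (by simp at h ⊢; omega)]
      rw [if_pos (by omega : (k + 1) % 2 = 1), if_neg hk, List.tail_cons]

lemma step_eq (s : String) (acc : List String) :
    fsmA s.toList "" false acc
    = (let parts := (PySem.Str.split? s "'").getD []
       (PySem.List.enumerate parts).foldl (fun acc it =>
         if PySem.Int.mod it.1 2 == 1 && it.1 != (parts.length : Int) - 1 then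
           let q := "'" ++ it.2 ++ "'"
           if q ∈ acc then acc else acc ++ [q]
         else acc) acc) := by
  rw [split?_eq]
  simp only [Option.getD_some]
  have h2 := enum_fold_spec ((pysplit s.toList).map String.ofList).length
      ((pysplit s.toList).map String.ofList) 0 acc (by omega)
  rw [if_neg (by norm_num : ¬ (0 : ℕ) % 2 = 1)] at h2
  rw [(fsm_spec s.toList "" acc).1]
  exact h2.symm

lemma ports_eq (producciones : List (List String)) :
    parseTerminales producciones = parseTerminales_alt producciones := by
  unfold parseTerminales parseTerminales_alt
  induction producciones using List.reverseRecOn with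
  | nil => rfl
  | append_singleton ps p ih =>
    rw [List.foldl_append, List.foldl_append, ← ih]
    simp only [List.foldl_cons, List.foldl_nil]
    rcases hg : PySem.List.pyGet? p 1 with _ | s
    · rfl
    · exact step_eq s _

-- ===== VERDICT (by name: the statement is the Claim_ definition above) =====
theorem parseTerminales_spec : Claim_equal_parseTerminales := by
  intro producciones _ _
  exact ports_eq producciones
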